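-- pv_equiv track=rewrite | github.com/achuthanandGit/aderant-code-test-solution | helper_fun.py | pick_maximal_overlap
-- ===== SOURCE A (Python) =====
-- import itertools
--
-- def overlap(arg_one, arg_two, min_length):
--     """ Return length of longest suffix of 'arg-one' matching a prefix of 'arg_two',
--         and the prefix is at least "min_length" characters.
--         If there is no such overlap, 0 is returned.
--     """
--     start = 0
--     while True:
--         start = arg_one.find(arg_two[:min_length], start)
--         if start == -1:
--             return 0
--         if arg_two.startswith(arg_one[start:]):
--             return len(arg_one)-start
--         start += 1
--
-- def pick_maximal_overlap(reads):
--     """ Finds the first and second read with maximum overlap.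
--         Returns two reads with mximum overlap along with that overlap
--     """
--     read_a, read_b = None, None
--     best_overlap_len = 0
--     for a, b in itertools.permutations(reads, 2):
--         # Calculating the overlap length for each pair
--         overlap_len = overlap(a, b, min_length=1)
--         """ Checks whether the overlap_len is greater than best_overlap_len
--             if it is, then best_overlap_len will be updated with new and
--             updates read_a and read_b with new pairs.
--             In some cases there may be multiple pairs with same longest overlap length.
--             But the first one will be the values that will be returned by the function.
--         """
--         if overlap_len > best_overlap_len:
--             read_a, read_b = a, b
--             best_overlap_len = overlap_len
--     return read_a, read_b, best_overlap_len
-- ===== SOURCE B (Python) =====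
-- def _suffix_prefix_overlap(a, b):
--     """Longest l >= 1 with a's length-l suffix equal to b's length-l prefix, else 0."""
--     for l in range(min(len(a), len(b)), 0, -1):
--         if a[len(a) - l:] == b[:l]:
--             return l
--     return 0
--
-- def pick_maximal_overlap(reads):
--     read_a, read_b = None, None
--     best_overlap_len = 0
--     for i, a in enumerate(reads):
--         for j, b in enumerate(reads):
--             if j == i:
--                 continue
--             overlap_len = _suffix_prefix_overlap(a, b)
--             if overlap_len > best_overlap_len:
--                 read_a, read_b = a, b
--                 best_overlap_len = overlap_len
--     return read_a, read_b, best_overlap_len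
-- ===== Notes on version B (the rewrite author's own statement) =====
-- stated objective: simpler
-- what changed: The overlap helper's find/startswith string-search loop is replaced by a direct descending scan over candidate overlap lengths (first l from min(len(a),len(b)) down to 1 with suffix == prefix), and the permutations-based outer loop becomes plain nested index loops skipping i == j.
import Mathlib
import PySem

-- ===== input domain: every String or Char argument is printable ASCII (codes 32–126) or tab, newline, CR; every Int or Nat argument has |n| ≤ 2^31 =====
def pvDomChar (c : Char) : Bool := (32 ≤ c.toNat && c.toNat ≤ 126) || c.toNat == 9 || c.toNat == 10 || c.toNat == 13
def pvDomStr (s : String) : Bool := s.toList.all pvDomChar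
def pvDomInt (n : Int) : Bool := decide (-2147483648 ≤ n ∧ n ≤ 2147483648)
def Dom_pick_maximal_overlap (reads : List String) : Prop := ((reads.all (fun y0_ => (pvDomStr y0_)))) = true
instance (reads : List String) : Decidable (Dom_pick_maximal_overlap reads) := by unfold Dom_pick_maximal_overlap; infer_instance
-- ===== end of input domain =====

-- B replaces the find/startswith string-search overlap helper by a direct descending scan over
-- candidate overlap lengths, and the itertools.permutations outer loop by nested index loops (objective: simpler).

-- ===== PORT A =====
-- A's `overlap`: the `while True` find/startswith loop.  The loop variable `start` grows by at
-- least 1 each iteration and the loop always returns once `start` passes `len(arg_one)`, so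
-- `arg_one.length + 2` iterations always suffice: the fuel is never exhausted on any input.
def overlapA_go (arg_one arg_two : List Char) (min_length : Int) (fuel : Nat) (start : Int) : Int :=
  match fuel with
  | 0 => 0
  | Nat.succ fuel =>
    let start' := PySem.Chars.findFrom arg_one (PySem.List.slice arg_two none (some min_length)) start none
    if start' = -1 then 0
    else if PySem.Chars.startswith arg_two (PySem.List.slice arg_one (some start') none) then
      (arg_one.length : Int) - start'
    else overlapA_go arg_one arg_two min_length fuel (start' + 1)

def overlapA (arg_one arg_two : String) (min_length : Int) : Int :=
  overlapA_go arg_one.toList arg_two.toList min_length (arg_one.toList.length + 2) 0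

def pick_maximal_overlap (reads : List String) : Option String × Option String × Int :=
  (PySem.List.permutations reads 2).foldl (fun st pr =>
    match pr with
    | [a, b] =>
      let overlap_len := overlapA a b 1
      if st.2.2 < overlap_len then (some a, some b, overlap_len) else st
    | _ => st) (none, none, 0)

-- ===== PORT B =====
-- B's `_suffix_prefix_overlap`: first l in range(min(len(a), len(b)), 0, -1) with a[len(a)-l:] == b[:l].
def overlapB_go (a b : List Char) : List Int → Int
  | [] => 0
  | l :: ls =>
    if PySem.List.slice a (some ((a.length : Int) - l)) none = PySem.List.slice b none (some l) then l
    else overlapB_go a b ls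

def overlapB (a b : String) : Int :=
  overlapB_go a.toList b.toList
    (PySem.List.pyRange (min (a.toList.length : Int) (b.toList.length : Int)) 0 (-1))

def pick_maximal_overlap_alt (reads : List String) : Option String × Option String × Int :=
  (PySem.List.enumerate reads 0).foldl (fun st p =>
    (PySem.List.enumerate reads 0).foldl (fun st q =>
      if q.1 = p.1 then st
      else
        let overlap_len := overlapB p.2 q.2
        if st.2.2 < overlap_len then (some p.2, some q.2, overlap_len) else st) st) (none, none, 0)

-- ===== PRECONDITION & SPEC =====
def Spec_pick_maximal_overlap (reads : List String) (out : Option String × Option String × Int) : Prop := out = pick_maximal_overlap_alt reads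
instance (reads : List String) (out : Option String × Option String × Int) : Decidable (Spec_pick_maximal_overlap reads out) := by unfold Spec_pick_maximal_overlap; infer_instance

-- ===== CLAIM (what is proved, stated in full; the proofs are below) =====
def Claim_equal_pick_maximal_overlap : Prop := ∀ (reads : List String), Dom_pick_maximal_overlap reads → Spec_pick_maximal_overlap reads (pick_maximal_overlap reads)

-- ===== LEMMAS AND PROOFS =====

-- Both overlap helpers compute the same reference value: `a.length - s` for the least
-- `s < a.length` with `a.drop s` a prefix of `b`, and 0 if there is no such `s`.

theorem infix_iff_exists_drop {α : Type} (s t : List α) : s <:+: t ↔ ∃ i, s <+: t.drop i := by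
  constructor
  · rintro ⟨u, v, rfl⟩; exact ⟨u.length, by simp⟩
  · rintro ⟨i, h⟩
    exact (List.infix_iff_prefix_suffix).2 ⟨t.drop i, h, t.drop_suffix i⟩

-- if a suffix `a.drop i` (with i < a.length) is a prefix of `c :: b'`, it starts with `c`
theorem head_prefix_of_drop_prefix (a : List Char) (c : Char) (b' : List Char) (i : Nat)
    (hi : i < a.length) (hp : a.drop i <+: c :: b') : [c] <+: a.drop i := by
  cases hd : a.drop i with
  | nil => have := a.length_drop (i := i); simp [hd] at this; omega
  | cons x r =>
    rw [hd] at hp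
    obtain ⟨rfl, -⟩ := List.cons_prefix_cons.1 hp
    exact ⟨r, rfl⟩

-- the reference value both helpers compute
def refO (a b : List Char) (l : List Nat) : Int :=
  match l.find? (fun s => decide (a.drop s <+: b)) with
  | none => 0
  | some s => (a.length : Int) - s

theorem refO_append_none (a b : List Char) (l₁ l₂ : List Nat)
    (h : ∀ s ∈ l₁, ¬ a.drop s <+: b) : refO a b (l₁ ++ l₂) = refO a b l₂ := by
  unfold refO
  rw [List.find?_append, List.find?_eq_none.2 (by simpa using h), Option.none_or]

theorem overlapA_go_eq (a b : List Char) (fuel k : Nat) (hk : k ≤ a.length)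
    (hf : a.length + 1 - k ≤ fuel) :
    overlapA_go a b 1 fuel (k : Int) = refO a b (List.range' k (a.length - k)) := by
  induction fuel generalizing k with
  | zero => omega
  | succ fuel ih =>
    have hsub : PySem.List.slice b none (some 1) = b.take 1 := by
      rw [PySem.List.slice_to b (by omega)]; rfl
    rw [overlapA_go]
    simp only [hsub]
    rw [PySem.Chars.findFrom_natCast a (b.take 1) k hk]
    cases b with
    | nil =>
      have hfind : PySem.Chars.find (a.drop k) (([] : List Char).take 1) = 0 := by
        cases a.drop k <;> rfl
      rw [hfind]
      simp only [if_neg (show ¬ ((0 : Int) = -1) by omega), add_zero]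
      rw [if_neg (show ¬ ((k : Int) = -1) by omega)]
      by_cases hlt : k < a.length
      · have hne : ¬ a.drop k <+: ([] : List Char) := by
          intro h
          have := h.length_le; simp at this; omega
        have hsw : ¬ (PySem.Chars.startswith [] (PySem.List.slice a (some ((k : Nat) : Int)) none) = true) := by
          rw [PySem.List.slice_from a (Int.natCast_nonneg _), Int.toNat_natCast,
            PySem.Chars.startswith_iff]
          exact hne
        rw [if_neg hsw]
        have : ((k : Int) + 1) = ((k + 1 : Nat) : Int) := by push_cast; ring
        rw [this, ih (k + 1) (by omega) (by omega)]
        have hrange : List.range' k (a.length - k) = k :: List.range' (k + 1) (a.length - (k + 1)) := by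
          have : a.length - k = (a.length - (k + 1)) + 1 := by omega
          rw [this, List.range'_succ]
        rw [hrange]
        unfold refO
        rw [List.find?_cons_of_neg (by simpa using hne)]
      · have hk' : k = a.length := by omega
        subst hk'
        have hsw : PySem.Chars.startswith [] (PySem.List.slice a (some ((a.length : Nat) : Int)) none) = true := by
          rw [PySem.List.slice_from a (Int.natCast_nonneg _), Int.toNat_natCast,
            PySem.Chars.startswith_iff]
          simp
        rw [if_pos hsw]
        simp [refO]
    | cons c b' =>
      have htake : (c :: b').take 1 = [c] := by simp
      rw [htake]
      by_cases hF : PySem.Chars.find (a.drop k) [c] = -1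
      · -- no further occurrence of the first character: A returns 0 and no suffix can be a prefix
        rw [if_pos hF, if_pos rfl]
        have hninf : ¬ [c] <:+: a.drop k := (PySem.Chars.find_eq_neg_one_iff _ _).1 hF
        have hnone : ∀ s ∈ List.range' k (a.length - k), ¬ a.drop s <+: c :: b' := by
          intro s hs hp
          obtain ⟨h1, h2⟩ := List.mem_range'_1.1 hs
          have hsl : s < a.length := by omega
          have hc : [c] <+: a.drop s := head_prefix_of_drop_prefix a c b' s hsl hp
          apply hninf
          rw [infix_iff_exists_drop]
          refine ⟨s - k, ?_⟩
          rwa [List.drop_drop, Nat.add_sub_cancel' h1]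
        unfold refO
        rw [List.find?_eq_none.2 (by simpa using hnone)]
      · rw [if_neg hF]
        have hFnn : 0 ≤ PySem.Chars.find (a.drop k) [c] :=
          (PySem.Chars.find_nonneg_iff _ _).2 ((PySem.Chars.find_ne_neg_one_iff _ _).1 hF)
        set F := PySem.Chars.find (a.drop k) [c] with hFdef
        have hff : PySem.Chars.findFrom a [c] (k : Int) none = (k : Int) + F := by
          rw [PySem.Chars.findFrom_natCast a [c] k hk, if_neg hF]
        have hspec := PySem.Chars.findFrom_natCast_spec a [c] k hk (by rw [hff]; omega)
        rw [hff] at hspec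
        obtain ⟨h1, h2, h3⟩ := hspec
        set j := k + F.toNat with hj
        have hjc : ((k : Int) + F).toNat = j := by omega
        rw [hjc] at h2 h3
        have hjlt : j < a.length := by
          have := h2.length_le
          simp only [List.length_drop, List.length_cons] at this
          omega
        have hki : ((k : Int) + F) = ((j : Nat) : Int) := by omega
        have hfail : ∀ i, k ≤ i → i < j → ¬ (a.drop i <+: c :: b') := by
          intro i hik hij hp
          have hil : i < a.length := by omega
          exact h3 i hik hij (head_prefix_of_drop_prefix a c b' i hil hp)
        rw [if_neg (show ¬ ((k : Int) + F = -1) by omega)]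
        have hswiff : (PySem.Chars.startswith (c :: b')
              (PySem.List.slice a (some ((k : Int) + F)) none) = true) ↔ (a.drop j <+: c :: b') := by
          rw [hki, PySem.List.slice_from a (Int.natCast_nonneg _), Int.toNat_natCast,
            PySem.Chars.startswith_iff]
        by_cases hsw : a.drop j <+: c :: b'
        · rw [if_pos (hswiff.2 hsw)]
          have hsplit : List.range' k (a.length - k)
              = List.range' k (j - k) ++ List.range' j (a.length - j) := by
            rw [show a.length - k = (j - k) + (a.length - j) by omega, ← List.range'_append_1,
              show k + (j - k) = j by omega]
          rw [hsplit, refO_append_none a (c :: b') _ _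
            (fun s hs => hfail s (List.mem_range'_1.1 hs).1 (by have := (List.mem_range'_1.1 hs).2; omega))]
          rw [show a.length - j = (a.length - j - 1) + 1 by omega, List.range'_succ]
          unfold refO
          rw [List.find?_cons_of_pos (by simpa using hsw)]
          rw [hki]
        · rw [if_neg (fun h => hsw (hswiff.1 h))]
          rw [show ((k : Int) + F + 1) = ((j + 1 : Nat) : Int) by omega]
          rw [ih (j + 1) (by omega) (by omega)]
          have hsplit : List.range' k (a.length - k)
              = List.range' k (j + 1 - k) ++ List.range' (j + 1) (a.length - (j + 1)) := by
            rw [show a.length - k = (j + 1 - k) + (a.length - (j + 1)) by omega,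
              ← List.range'_append_1, show k + (j + 1 - k) = j + 1 by omega]
          rw [hsplit, refO_append_none a (c :: b') _ _ ?_]
          intro s hs
          obtain ⟨hs1, hs2⟩ := List.mem_range'_1.1 hs
          rcases Nat.lt_or_ge s j with h | h
          · exact hfail s hs1 h
          · have : s = j := by omega
            subst this
            exact hsw

theorem overlapB_go_eq (a b : List Char) (m : Nat) (hma : m ≤ a.length) (hmb : m ≤ b.length) :
    overlapB_go a b (PySem.List.pyRange (m : Int) 0 (-1)) =
      refO a b (List.range' (a.length - m) m) := by
  induction m with
  | zero => rw [PySem.List.pyRange_neg_one_eq_nil (by omega)]; rfl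
  | succ m ih =>
    rw [PySem.List.pyRange_neg_one_cons (by positivity)]
    rw [overlapB_go]
    push_cast
    have hs : a.length - (m + 1) + 1 = a.length - m := by omega
    have hrange : List.range' (a.length - (m + 1)) (m + 1)
        = (a.length - (m + 1)) :: List.range' (a.length - m) m := by
      rw [List.range'_succ, hs]
    have hcond : (PySem.List.slice a (some ((a.length : Int) - ((m : Int) + 1))) none
          = PySem.List.slice b none (some ((m : Int) + 1)))
        ↔ (a.drop (a.length - (m + 1)) <+: b) := by
      have h1 : ((a.length : Int) - ((m : Int) + 1)) = ((a.length - (m + 1) : Nat) : Int) := by omega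
      have h2 : ((m : Int) + 1) = ((m + 1 : Nat) : Int) := by push_cast; ring
      rw [h1, h2, PySem.List.slice_from a (Int.natCast_nonneg _), PySem.List.slice_to b (Int.natCast_nonneg _),
        Int.toNat_natCast, Int.toNat_natCast]
      rw [List.prefix_iff_eq_take]
      have hlen : (a.drop (a.length - (m + 1))).length = m + 1 := by
        rw [List.length_drop]; omega
      rw [hlen]
    by_cases hc : a.drop (a.length - (m + 1)) <+: b
    · rw [if_pos (hcond.2 hc), hrange]
      unfold refO
      rw [List.find?_cons_of_pos (by simpa using hc)]
      push_cast; omega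
    · rw [if_neg (fun h => hc (hcond.1 h))]
      have : ((m : Int) + 1 - 1) = (m : Int) := by ring
      rw [this, ih (by omega) (by omega), hrange]
      unfold refO
      rw [List.find?_cons_of_neg (by simpa using hc)]

theorem refO_range_shrink (a b : List Char) :
    refO a b (List.range' 0 a.length)
      = refO a b (List.range' (a.length - min a.length b.length) (min a.length b.length)) := by
  set m := min a.length b.length with hm
  have h1 := List.range'_append_1 (s := 0) (m := a.length - m) (n := m)
  rw [Nat.zero_add, show a.length - m + m = a.length by omega] at h1
  rw [← h1, refO_append_none]
  intro s hs hp
  have hs2 := (List.mem_range'_1.1 hs).2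
  have hl := hp.length_le
  rw [List.length_drop] at hl
  omega

theorem overlap_eq (a b : String) : overlapA a b 1 = overlapB a b := by
  unfold overlapA overlapB
  have hA := overlapA_go_eq a.toList b.toList (a.toList.length + 2) 0 (by omega) (by omega)
  rw [Nat.cast_zero] at hA
  rw [hA]
  rw [show (min (a.toList.length : Int) (b.toList.length : Int))
      = ((min a.toList.length b.toList.length : Nat) : Int) by rw [Nat.cast_min]]
  rw [overlapB_go_eq a.toList b.toList _ (Nat.min_le_left _ _) (Nat.min_le_right _ _)]
  rw [Nat.sub_zero]
  exact refO_range_shrink a.toList b.toList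

-- enumerate-fold lemmas: the index-skipping inner loop of B is a fold over `eraseIdx`
theorem enum_foldl_skip_none {α σ : Type} (g : σ → α → σ) :
    ∀ (xs : List α) (s i : Int) (st : σ), i < s →
    (PySem.List.enumerate xs s).foldl (fun st q => if q.1 = i then st else g st q.2) st
      = xs.foldl g st := by
  intro xs
  induction xs with
  | nil => intro s i st _; rfl
  | cons x t ih =>
    intro s i st h
    rw [PySem.List.enumerate_cons]
    simp only [List.foldl_cons, if_neg (by omega : ¬ s = i)]
    exact ih (s + 1) i (g st x) (by omega)

theorem enum_foldl_skip {α σ : Type} (g : σ → α → σ) :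
    ∀ (xs : List α) (k : Nat) (s : Int) (st : σ),
    (PySem.List.enumerate xs s).foldl (fun st q => if q.1 = s + k then st else g st q.2) st
      = (xs.eraseIdx k).foldl g st := by
  intro xs
  induction xs with
  | nil => intro k s st; rfl
  | cons x t ih =>
    intro k s st
    rw [PySem.List.enumerate_cons]
    cases k with
    | zero =>
      simp only [List.foldl_cons, Nat.cast_zero, add_zero, List.eraseIdx_cons_zero]
      exact enum_foldl_skip_none g t (s + 1) s st (by omega)
    | succ k =>
      simp only [List.foldl_cons, if_neg (by push_cast; omega : ¬ s = s + ((k : Nat) + 1 : Nat)),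
        List.eraseIdx_cons_succ]
      have : s + ((k + 1 : Nat) : Int) = (s + 1) + (k : Nat) := by push_cast; ring
      rw [this]
      exact ih k (s + 1) (g st x)

theorem enum_foldl_skip0 {α σ : Type} (g : σ → α → σ) (xs : List α) (k : Nat) (st : σ) :
    (PySem.List.enumerate xs 0).foldl (fun st q => if q.1 = (k : Int) then st else g st q.2) st
      = (xs.eraseIdx k).foldl g st := by
  have h := enum_foldl_skip g xs k 0 st
  simpa using h

theorem range_foldl_skip {α σ : Type} (g : σ → α → σ) (xs : List α) (d : α) (k : Nat) (st : σ) :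
    (List.range xs.length).foldl
        (fun st (j : Nat) => if j = k then st else g st (xs[j]?.getD d)) st
      = (xs.eraseIdx k).foldl g st := by
  have h := enum_foldl_skip0 g xs k st
  rw [PySem.List.enumerate_eq_map_pyRange xs d] at h
  simpa [PySem.List.len_eq, PySem.List.pyRange_zero_nat, List.map_map, List.foldl_map,
    Function.comp] using h

-- permutations with r = 2, unfolded to an index flatMap
theorem perm_zero {α : Type} (xs : List α) : PySem.List.permutations xs 0 = [[]] := by
  rw [PySem.List.permutations.eq_def]

theorem perm_succ {α : Type} (xs : List α) (r : Nat) : PySem.List.permutations xs (r + 1) =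
    (List.range xs.length).flatMap
      (fun i => match xs[i]? with
        | none => []
        | some x => (PySem.List.permutations (xs.eraseIdx i) r).map (fun p => x :: p)) := by
  cases r <;> rfl

theorem perm1 {α : Type} (xs : List α) : PySem.List.permutations xs 1 = xs.map (fun y => [y]) := by
  induction xs with
  | nil => rfl
  | cons x t ih =>
    have ht := ih
    rw [show (1 : Nat) = 0 + 1 from rfl, perm_succ] at ht ⊢
    simp only [perm_zero, List.map_cons, List.map_nil, List.length_cons, List.range_succ_eq_map,
      List.flatMap_cons, List.flatMap_map, List.getElem?_cons_zero, List.getElem?_cons_succ] at ht ⊢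
    rw [ht]
    rfl

-- the common middle form of both outer loops: nested index folds over `eraseIdx`,
-- with B's overlap helper
def midFold (reads : List String) : Option String × Option String × Int :=
  (List.range reads.length).foldl (fun st i => (reads.eraseIdx i).foldl
    (fun st y =>
      let overlap_len := overlapB (reads.getD i "") y
      if st.2.2 < overlap_len then (some (reads.getD i ""), some y, overlap_len) else st) st)
    (none, none, 0)

theorem a_eq_mid (reads : List String) : pick_maximal_overlap reads = midFold reads := by
  unfold pick_maximal_overlap midFold
  rw [show (2 : Nat) = 1 + 1 from rfl, perm_succ]
  simp only [perm1, List.map_map, List.foldl_flatMap]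
  apply PySem.List.foldl_congr_mem
  intro st i hi
  have hilt : i < reads.length := List.mem_range.1 hi
  rw [List.getElem?_eq_getElem hilt]
  simp only [List.foldl_map, Function.comp]
  rw [show reads[i] = reads.getD i "" from (List.getD_eq_getElem reads "" hilt).symm]
  apply PySem.List.foldl_congr_mem
  intro st' y _
  simp only [overlap_eq]

theorem alt_eq_mid (reads : List String) : pick_maximal_overlap_alt reads = midFold reads := by
  unfold pick_maximal_overlap_alt midFold
  rw [PySem.List.enumerate_eq_map_pyRange reads ""]
  simp only [PySem.List.len_eq, PySem.List.pyRange_zero_nat, List.map_map, List.foldl_map,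
    Function.comp]
  apply PySem.List.foldl_congr_mem
  intro st k hk
  have hklt : k < reads.length := List.mem_range.1 hk
  rw [PySem.List.pyGetD_natCast]
  simpa using range_foldl_skip
    (fun st y => if st.2.2 < overlapB (reads.getD k "") y
      then (some (reads.getD k ""), some y, overlapB (reads.getD k "") y) else st) reads "" k st

-- ===== VERDICT (by name: the statement is the Claim_ definition above) =====
theorem pick_maximal_overlap_spec : Claim_equal_pick_maximal_overlap := by
  intro reads _
  unfold Spec_pick_maximal_overlap
  rw [a_eq_mid reads, alt_eq_mid reads]
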